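-- pv_equiv track=rewrite | github.com/seblee97/fuzzy_actions | pair_datasets.py | _segment_by_label
-- ===== SOURCE A (Python) =====
-- def _segment_by_label(labels_1d) -> list[tuple[int, int, int]]:
--     """Split a 1-D label sequence into (label, t_start, t_end) segments.
--
--     Both ``t_start`` and ``t_end`` are inclusive.
--     """
--     T = len(labels_1d)
--     segments = []
--     current = int(labels_1d[0])
--     t_start = 0
--     for t in range(1, T):
--         v = int(labels_1d[t])
--         if v != current:
--             segments.append((current, t_start, t - 1))
--             current = v
--             t_start = t
--     segments.append((current, t_start, T - 1))
--     return segments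
-- ===== SOURCE B (Python) =====
-- def _segment_by_label(labels_1d) -> list[tuple[int, int, int]]:
--     """Split a 1-D label sequence into (label, t_start, t_end) segments.
--
--     Divide and conquer: segment each half, then join the halves, fusing the
--     boundary segments when they carry the same label.
--     """
--     labels = [int(v) for v in labels_1d]
--
--     def merge(left, right):
--         if left[-1][0] == right[0][0]:
--             label, start, _ = left[-1]
--             _, _, end = right[0]
--             return left[:-1] + [(label, start, end)] + right[1:]
--         return left + right
--
--     def rec(lo, hi):
--         if lo >= hi:
--             return []
--         if hi - lo == 1:
--             return [(labels[lo], lo, lo)]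
--         mid = (lo + hi) // 2
--         return merge(rec(lo, mid), rec(mid, hi))
--
--     return rec(0, len(labels))
-- ===== Notes on version B (the rewrite author's own statement) =====
-- stated objective: alternative
-- what changed: B segments by divide and conquer: it recursively segments each half of the index range and merges the two segment lists, fusing the boundary segments when their labels agree, instead of A's single stateful left-to-right loop that flushes a segment at each change point.
-- crash fix: On the empty list A raises IndexError (it reads labels_1d[0] up front) while B returns []. — e.g. on _segment_by_label([]): A raises IndexError, B returns []
import Mathlib
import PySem

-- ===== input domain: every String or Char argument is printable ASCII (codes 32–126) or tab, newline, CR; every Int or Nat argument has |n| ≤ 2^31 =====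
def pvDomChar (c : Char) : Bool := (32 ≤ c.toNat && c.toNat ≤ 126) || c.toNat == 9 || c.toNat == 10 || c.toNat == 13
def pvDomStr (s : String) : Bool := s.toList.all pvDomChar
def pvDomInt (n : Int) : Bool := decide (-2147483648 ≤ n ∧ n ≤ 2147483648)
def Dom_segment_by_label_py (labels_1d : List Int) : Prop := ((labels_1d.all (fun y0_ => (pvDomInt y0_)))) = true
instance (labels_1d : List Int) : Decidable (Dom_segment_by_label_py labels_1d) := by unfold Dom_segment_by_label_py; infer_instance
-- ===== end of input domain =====

-- B replaces A's stateful flush-on-change loop by divide and conquer: segment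
-- each half of the index range, then merge the two segment lists, fusing the
-- boundary segments when their labels agree (alternative; return value only,
-- neither version mutates its argument).

-- ===== PORT A =====
-- the loop body: v = int(labels_1d[t]); if v != current: flush segment, reset
def stepA (labels_1d : List Int) (st : List (Int × Int × Int) × Int × Int) (t : Int) :
    List (Int × Int × Int) × Int × Int :=
  let v := PySem.List.pyGetD labels_1d t 0
  if v ≠ st.2.1 then (st.1 ++ [(st.2.1, st.2.2, t - 1)], v, t) else st

def segment_by_label_py (labels_1d : List Int) : List (Int × Int × Int) :=
  let T : Int := labels_1d.length
  -- current = int(labels_1d[0]); Python raises IndexError when the list is empty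
  -- (excluded by Pre_), so the default of pyGetD is never read.
  let st := (PySem.List.pyRange 1 T 1).foldl (stepA labels_1d) ([], PySem.List.pyGetD labels_1d 0 0, 0)
  st.1 ++ [(st.2.1, st.2.2, T - 1)]

-- ===== PORT B =====
-- Source B's helper `merge(left, right)`: left and right are nonempty on every call
-- (left[-1] / right[0] never raise), so the getLastD/headD defaults are never read.
def mergeB (left right : List (Int × Int × Int)) : List (Int × Int × Int) :=
  let lL := left.getLastD (0, 0, 0)   -- left[-1]
  let hR := right.headD (0, 0, 0)     -- right[0]
  if lL.1 = hR.1 then left.dropLast ++ [(lL.1, lL.2.1, hR.2.2)] ++ right.tail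
  else left ++ right

-- Source B's helper `rec(lo, hi)`; labels[lo] is in range whenever read (lo < hi ≤ len)
def recB (labels : List Int) (lo hi : Nat) : List (Int × Int × Int) :=
  if hi ≤ lo then []
  else if hi - lo = 1 then [(PySem.List.pyGetD labels (lo : Int) 0, (lo : Int), (lo : Int))]
  else
    let mid := (lo + hi) / 2
    mergeB (recB labels lo mid) (recB labels mid hi)
termination_by hi - lo
decreasing_by all_goals omega

def segment_by_label_py_alt (labels_1d : List Int) : List (Int × Int × Int) :=
  let labels := labels_1d.map (fun v => v)   -- [int(v) for v in labels_1d]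
  recB labels 0 labels.length

-- ===== PRECONDITION & SPEC =====
-- Pre_ excludes only the empty list, on which A raises IndexError (labels_1d[0]).
def Pre_segment_by_label_py (labels_1d : List Int) : Prop := labels_1d ≠ []
instance (labels_1d : List Int) : Decidable (Pre_segment_by_label_py labels_1d) := by
  unfold Pre_segment_by_label_py; infer_instance

def pvWitness_segment_by_label_py : List Int := [1, 1, 2, 2, 2, 0]

-- On the empty list A raises IndexError (it reads labels_1d[0] up front) while B returns [].
def Raises_segment_by_label_py (labels_1d : List Int) : Prop := labels_1d = []
instance (labels_1d : List Int) : Decidable (Raises_segment_by_label_py labels_1d) := by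
  unfold Raises_segment_by_label_py; infer_instance
def pvRaiseWitness_segment_by_label_py : List Int := []
def pvRaiseWitnessOut_segment_by_label_py : List (Int × Int × Int) := []

def Spec_segment_by_label_py (labels_1d : List Int) (out : List (Int × Int × Int)) : Prop :=
  out = segment_by_label_py_alt labels_1d
instance (labels_1d : List Int) (out : List (Int × Int × Int)) :
    Decidable (Spec_segment_by_label_py labels_1d out) := by
  unfold Spec_segment_by_label_py; infer_instance

-- ===== CLAIM (what is proved, stated in full; the proofs are below) =====
def Claim_equal_segment_by_label_py : Prop :=
  ∀ (labels_1d : List Int), Dom_segment_by_label_py labels_1d →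
    Pre_segment_by_label_py labels_1d →
      Spec_segment_by_label_py labels_1d (segment_by_label_py labels_1d)

def Claim_raises_segment_by_label_py : Prop :=
  (∀ (labels_1d : List Int), Dom_segment_by_label_py labels_1d →
      Raises_segment_by_label_py labels_1d → ¬ Pre_segment_by_label_py labels_1d) ∧
  (Dom_segment_by_label_py (pvRaiseWitness_segment_by_label_py) ∧
    Raises_segment_by_label_py (pvRaiseWitness_segment_by_label_py) ∧
    segment_by_label_py_alt (pvRaiseWitness_segment_by_label_py) = pvRaiseWitnessOut_segment_by_label_py)

-- ===== LEMMAS AND PROOFS =====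

-- the canonical run decomposition both ports are proved equal to
def takeRun (x : Int) : List Int → Nat × List Int
  | [] => (0, [])
  | y :: ys => if y = x then let p := takeRun x ys; (p.1 + 1, p.2) else (0, y :: ys)

theorem takeRun_len (x : Int) (l : List Int) :
    (takeRun x l).1 + (takeRun x l).2.length = l.length := by
  induction l with
  | nil => simp [takeRun]
  | cons y ys ih =>
    by_cases hy : y = x
    · simp only [takeRun, if_pos hy, List.length_cons]
      omega
    · simp [takeRun, hy]

theorem takeRun_append (x : Int) (xs ys : List Int) :
    takeRun x (xs ++ ys)
      = if (takeRun x xs).2 = []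
          then ((takeRun x xs).1 + (takeRun x ys).1, (takeRun x ys).2)
          else ((takeRun x xs).1, (takeRun x xs).2 ++ ys) := by
  induction xs with
  | nil => simp [takeRun]
  | cons y ys' ih =>
    by_cases hy : y = x
    · simp only [List.cons_append, takeRun, if_pos hy, ih]
      by_cases hr : (takeRun x ys').2 = []
      · simp only [hr]
        simp
        omega
      · simp only [if_neg hr]
    · simp [takeRun, hy]

theorem takeRun_snd_length_le (x : Int) (l : List Int) : (takeRun x l).2.length ≤ l.length := by
  induction l with
  | nil => simp [takeRun]
  | cons y ys ih =>
    simp only [takeRun]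
    split
    · simpa using Nat.le_succ_of_le ih
    · simp

def goRuns (l : List Int) (pos : Int) : List (Int × Int × Int) :=
  match l with
  | [] => []
  | x :: xs =>
      let p := takeRun x xs
      let n : Int := (p.1 : Int) + 1
      (x, pos, pos + n - 1) :: goRuns p.2 (pos + n)
termination_by l.length
decreasing_by exact Nat.lt_succ_of_le (takeRun_snd_length_le x xs)

theorem goRuns_cons (x : Int) (xs : List Int) (pos : Int) :
    goRuns (x :: xs) pos
      = (x, pos, pos + (((takeRun x xs).1 : Int) + 1) - 1)
          :: goRuns (takeRun x xs).2 (pos + (((takeRun x xs).1 : Int) + 1)) := by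
  rw [goRuns.eq_def]

theorem goRuns_ne_nil (l : List Int) (pos : Int) (h : l ≠ []) : goRuns l pos ≠ [] := by
  match l, h with
  | x :: xs, _ => rw [goRuns_cons]; simp

theorem mergeB_cons (h : Int × Int × Int) (L R : List (Int × Int × Int)) (hL : L ≠ []) :
    mergeB (h :: L) R = h :: mergeB L R := by
  match L, hL with
  | y :: ys, _ =>
    simp only [mergeB, List.getLastD_eq_getLast?, List.getLast?_cons_cons]
    split <;> simp

theorem goRuns_append (xs : List Int) :
    ∀ (ys : List Int) (pos : Int), xs ≠ [] → ys ≠ [] →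
      goRuns (xs ++ ys) pos
        = mergeB (goRuns xs pos) (goRuns ys (pos + (xs.length : Int))) := by
  induction hn : xs.length using Nat.strong_induction_on generalizing xs with
  | _ n ih =>
  intro ys pos hxs hys
  match xs, hxs with
  | x :: xs', _ =>
    subst hn
    rcases h' : takeRun x xs' with ⟨nx, rx⟩
    have hTR := takeRun_append x xs' ys
    rw [h'] at hTR
    by_cases hrem : rx = []
    · -- the first run of xs reaches xs's end
      subst hrem
      have hlenr : nx = xs'.length := by
        have := takeRun_len x xs'; rw [h'] at this; simpa using this
      rw [if_pos rfl] at hTR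
      dsimp only at hTR
      match ys, hys with
      | y :: ys', _ =>
        by_cases hy : y = x
        · subst hy
          rcases h'' : takeRun y ys' with ⟨my, ry⟩
          have hTRy : takeRun y (y :: ys') = (my + 1, ry) := by
            simp [takeRun, h'']
          rw [hTRy] at hTR
          dsimp only at hTR
          rw [List.cons_append, goRuns_cons, hTR]
          rw [goRuns_cons (pos := pos), h',
              goRuns_cons (pos := pos + (((y :: xs').length : Nat) : Int)), h'']
          dsimp only
          rw [goRuns.eq_def (l := ([] : List Int))]
          subst hlenr
          simp only [mergeB, List.getLastD, List.headD, List.tail_cons, List.dropLast,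
            List.nil_append, List.singleton_append, List.getLast_singleton]
          simp only [if_true]
          refine List.cons_eq_cons.mpr ⟨?_, ?_⟩
          · simp only [Prod.mk.injEq, List.length_cons, true_and]
            push_cast
            omega
          · congr 1
            push_cast [List.length_cons]
            omega
        · have hTRy : takeRun x (y :: ys') = (0, y :: ys') := by simp [takeRun, hy]
          rw [hTRy] at hTR
          dsimp only at hTR
          rw [List.cons_append, goRuns_cons, hTR]
          rw [goRuns_cons (pos := pos), h']
          dsimp only
          rw [goRuns.eq_def (l := ([] : List Int))]
          rw [goRuns_cons (pos := pos + (((x :: xs').length : Nat) : Int))]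
          subst hlenr
          simp only [mergeB, List.getLastD, List.headD, List.tail_cons, List.dropLast,
            List.cons_append, List.nil_append, List.getLast_singleton]
          rw [if_neg (fun h => hy h.symm), goRuns_cons]
          refine List.cons_eq_cons.mpr ⟨?_, List.cons_eq_cons.mpr ⟨?_, ?_⟩⟩
          · simp only [Prod.mk.injEq, true_and]
            push_cast
            omega
          · simp only [Prod.mk.injEq, List.length_cons, true_and]
            push_cast
            omega
          · congr 1
    · -- the first run of xs ends inside xs
      rw [if_neg hrem] at hTR
      rw [List.cons_append, goRuns_cons, hTR]
      have hlt : rx.length < (x :: xs').length := by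
        have := takeRun_snd_length_le x xs'
        rw [h'] at this
        dsimp only at this
        simp only [List.length_cons]; omega
      rw [ih rx.length hlt rx rfl ys _ hrem hys]
      rw [goRuns_cons (pos := pos), h']
      dsimp only
      rw [mergeB_cons _ _ _ (goRuns_ne_nil _ _ hrem)]
      have harith : pos + ((nx : Int) + 1) + ((rx.length : Nat) : Int)
          = pos + (((x :: xs').length : Nat) : Int) := by
        have := takeRun_len x xs'
        rw [h'] at this
        dsimp only at this
        simp only [List.length_cons]
        push_cast
        omega
      rw [harith]

-- ===== A's loop rephrased as a positional pass, then flushed into goRuns =====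
def goA (vs : List Int) (pos : Int) (st : List (Int × Int × Int) × Int × Int) :
    List (Int × Int × Int) × Int × Int :=
  match vs with
  | [] => st
  | v :: vs' =>
      goA vs' (pos + 1) (if v ≠ st.2.1 then (st.1 ++ [(st.2.1, st.2.2, pos - 1)], v, pos) else st)

theorem foldl_stepA_eq_goA (xs : List Int) (a : Nat)
    (st : List (Int × Int × Int) × Int × Int) :
    (PySem.List.pyRange (a : Int) (xs.length : Int) 1).foldl (stepA xs) st
      = goA (xs.drop a) (a : Int) st := by
  induction hn : xs.length - a generalizing a st with
  | zero =>
    have h : xs.length ≤ a := by omega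
    rw [PySem.List.pyRange_one_eq_nil (by exact_mod_cast h), List.drop_eq_nil_of_le h]
    simp [goA]
  | succ n ih =>
    have h : a < xs.length := by omega
    rw [PySem.List.pyRange_one_cons (by exact_mod_cast h), List.foldl_cons,
        List.drop_eq_getElem_cons h]
    have hv : PySem.List.pyGetD xs (a : Int) 0 = xs[a] := by
      rw [PySem.List.pyGetD_natCast, List.getD_eq_getElem xs 0 h]
    show _ = goA (xs[a] :: xs.drop (a + 1)) (a : Int) st
    simp only [goA, stepA, hv]
    have hcast : (a : Int) + 1 = ((a + 1 : Nat) : Int) := by push_cast; ring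
    rw [hcast, ih (a + 1) _ (by omega)]

theorem goA_flush (vs : List Int) :
    ∀ (pos ts : Int) (segs : List (Int × Int × Int)) (cur : Int),
      (goA vs pos (segs, cur, ts)).1
          ++ [((goA vs pos (segs, cur, ts)).2.1, (goA vs pos (segs, cur, ts)).2.2,
               pos + (vs.length : Int) - 1)]
        = segs ++ (cur, ts, (pos - 1) + ((takeRun cur vs).1 : Int))
            :: goRuns (takeRun cur vs).2 (pos + ((takeRun cur vs).1 : Int)) := by
  induction vs with
  | nil => intro pos ts segs cur; simp [goA, takeRun, goRuns]
  | cons v vs' ih =>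
    intro pos ts segs cur
    by_cases hv : v = cur
    · subst hv
      have hlen : pos + ((v :: vs').length : Int) - 1 = (pos + 1) + ((vs'.length : Int)) - 1 := by
        push_cast [List.length_cons]; ring
      rw [hlen]
      simp only [goA, ne_eq, not_true_eq_false, if_false, ite_true, takeRun]
      rw [ih (pos + 1) ts segs v]
      have h1 : (pos + 1 - 1) + (((takeRun v vs').1 : Nat) : Int)
          = pos - 1 + ((((takeRun v vs').1 + 1 : Nat)) : Int) := by push_cast; ring
      have h2 : (pos + 1) + (((takeRun v vs').1 : Nat) : Int)
          = pos + ((((takeRun v vs').1 + 1 : Nat)) : Int) := by push_cast; ring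
      rw [h1, h2]
    · have hlen : pos + ((v :: vs').length : Int) - 1 = (pos + 1) + ((vs'.length : Int)) - 1 := by
        push_cast [List.length_cons]; ring
      rw [hlen]
      simp only [goA, ne_eq, hv, not_false_eq_true, if_pos, ite_false, takeRun]
      rw [ih (pos + 1) pos (segs ++ [(cur, ts, pos - 1)]) v]
      rw [goRuns_cons]
      have e1 : (pos + 1 - 1) + (((takeRun v vs').1 : Nat) : Int)
          = pos + ((((takeRun v vs').1 : Nat) : Int) + 1) - 1 := by ring
      have e2 : (pos + 1) + (((takeRun v vs').1 : Nat) : Int)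
          = pos + ((((takeRun v vs').1 : Nat) : Int) + 1) := by ring
      rw [e1, e2]
      simp

theorem A_eq_goRuns (l0 : Int) (rest : List Int) :
    segment_by_label_py (l0 :: rest) = goRuns (l0 :: rest) 0 := by
  unfold segment_by_label_py
  have hfold := foldl_stepA_eq_goA (l0 :: rest) 1 ([], PySem.List.pyGetD (l0 :: rest) 0 0, 0)
  have hget0 : PySem.List.pyGetD (l0 :: rest) (0 : Int) 0 = l0 := by simp [pysem]
  rw [hget0] at hfold
  have h1 : ((1 : Nat) : Int) = (1 : Int) := by norm_num
  rw [h1] at hfold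
  simp only [List.drop_succ_cons, List.drop_zero] at hfold
  simp only [hget0, hfold]
  have hflush := goA_flush rest 1 0 [] l0
  have hlen : (1 : Int) + ((rest.length : Int)) - 1 = ((l0 :: rest).length : Int) - 1 := by
    push_cast [List.length_cons]; ring
  rw [hlen] at hflush
  rw [hflush, goRuns_cons]
  have e1 : (1 : Int) - 1 + (((takeRun l0 rest).1 : Nat) : Int)
      = (0 : Int) + ((((takeRun l0 rest).1 : Nat) : Int) + 1) - 1 := by ring
  have e2 : (1 : Int) + (((takeRun l0 rest).1 : Nat) : Int)
      = (0 : Int) + ((((takeRun l0 rest).1 : Nat) : Int) + 1) := by ring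
  rw [e1, e2]
  simp

theorem recB_eq (labels : List Int) :
    ∀ (lo hi : Nat), lo < hi → hi ≤ labels.length →
      recB labels lo hi = goRuns ((labels.drop lo).take (hi - lo)) (lo : Int) := by
  intro lo hi
  induction hn : hi - lo using Nat.strong_induction_on generalizing lo hi with
  | _ n ih =>
  intro hlt hle
  subst hn
  rw [recB]
  rw [if_neg (by omega)]
  by_cases h1 : hi - lo = 1
  · rw [if_pos h1, h1]
    have hlo : lo < labels.length := by omega
    rw [List.drop_eq_getElem_cons hlo, List.take_succ_cons, List.take_zero]
    rw [goRuns.eq_def]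
    simp only [takeRun, goRuns]
    have : PySem.List.pyGetD labels (lo : Int) 0 = labels[lo] := by
      rw [PySem.List.pyGetD_natCast, List.getD_eq_getElem labels 0 hlo]
    rw [this]
    norm_num
  · rw [if_neg h1]
    have hmid1 : lo < (lo + hi) / 2 := by omega
    have hmid2 : (lo + hi) / 2 < hi := by omega
    show mergeB (recB labels lo ((lo + hi) / 2)) (recB labels ((lo + hi) / 2) hi) = _
    rw [ih ((lo + hi) / 2 - lo) (by omega) lo ((lo + hi) / 2) rfl hmid1 (by omega),
        ih (hi - (lo + hi) / 2) (by omega) ((lo + hi) / 2) hi rfl hmid2 hle]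
    -- split the slice at mid
    have hsplit : (labels.drop lo).take (hi - lo)
        = (labels.drop lo).take ((lo + hi) / 2 - lo)
            ++ ((labels.drop ((lo + hi) / 2)).take (hi - (lo + hi) / 2)) := by
      have h2 : hi - lo = ((lo + hi) / 2 - lo) + (hi - (lo + hi) / 2) := by omega
      have e0 : lo + ((lo + hi) / 2 - lo) = (lo + hi) / 2 := by omega
      rw [h2, List.take_add, List.drop_drop, e0]
    rw [hsplit]
    have hlen1 : ((labels.drop lo).take ((lo + hi) / 2 - lo)).length = (lo + hi) / 2 - lo := by
      simp; omega
    have hne1 : (labels.drop lo).take ((lo + hi) / 2 - lo) ≠ [] := by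
      intro h; rw [h] at hlen1; simp at hlen1; omega
    have hne2 : (labels.drop ((lo + hi) / 2)).take (hi - (lo + hi) / 2) ≠ [] := by
      intro h
      have := congrArg List.length h
      simp at this; omega
    rw [goRuns_append _ _ _ hne1 hne2, hlen1]
    have e : lo + ((lo + hi) / 2 - lo) = (lo + hi) / 2 := by omega
    congr 2
    exact_mod_cast (congrArg (fun n : Nat => (n : Int)) e).symm

theorem B_eq_goRuns (labels : List Int) (h : labels ≠ []) :
    segment_by_label_py_alt labels = goRuns labels 0 := by
  unfold segment_by_label_py_alt
  simp only [List.map_id']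
  have hlen : 0 < labels.length := List.length_pos_of_ne_nil h
  rw [recB_eq labels 0 labels.length hlen (le_refl _)]
  simp

-- ===== VERDICT (by name: the statement is the Claim_ definition above) =====
theorem segment_by_label_py_spec : Claim_equal_segment_by_label_py := by
  intro labels _ hpre
  unfold Spec_segment_by_label_py
  match labels, hpre with
  | l0 :: rest, _ =>
    rw [A_eq_goRuns, B_eq_goRuns _ (by simp)]

theorem segment_by_label_py_raises : Claim_raises_segment_by_label_py := by
  unfold Claim_raises_segment_by_label_py
  refine ⟨fun l _ h => by simp [Raises_segment_by_label_py] at h; simp [Pre_segment_by_label_py, h],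
         by decide, by decide, ?_⟩
  simp [segment_by_label_py_alt, pvRaiseWitness_segment_by_label_py,
        pvRaiseWitnessOut_segment_by_label_py, recB]

-- self-check: the raise-witness value asserted above is forced by the theorem
theorem segment_by_label_py_raises_witness_ok :
    segment_by_label_py_alt pvRaiseWitness_segment_by_label_py
      = pvRaiseWitnessOut_segment_by_label_py :=
  segment_by_label_py_raises.2.2.2
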